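-- pv_equiv track=rewrite | github.com/ahashone/aurora-sun-v1 | src/agents/tron/threat_monitor.py | _check_injection
-- ===== SOURCE A (Python) =====
-- def _check_injection(payload: str) -> bool:
--     """Check payload for common injection patterns.
--
--     Args:
--         payload: String to check.
--
--     Returns:
--         True if injection patterns detected.
--     """
--     if not payload:
--         return False
--
--     payload_lower = payload.lower()
--
--     # SQL injection patterns
--     sql_patterns = [
--         "' or '1'='1",
--         "'; drop table",
--         "union select",
--         "' or 1=1",
--         "1; delete from",
--     ]
--
--     # XSS patterns
--     xss_patterns = [
--         "<script>",
--         "javascript:",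
--         "onerror=",
--         "onload=",
--     ]
--
--     # Path traversal
--     path_patterns = [
--         "../",
--         "..\\",
--         "/etc/passwd",
--     ]
--
--     all_patterns = sql_patterns + xss_patterns + path_patterns
--     return any(p in payload_lower for p in all_patterns)
-- ===== SOURCE B (Python) =====
-- _PATTERNS = (
--     "' or '1'='1",
--     "'; drop table",
--     "union select",
--     "' or 1=1",
--     "1; delete from",
--     "<script>",
--     "javascript:",
--     "onerror=",
--     "onload=",
--     "../",
--     "..\\",
--     "/etc/passwd",
-- )
--
--
-- def _check_injection(payload: str) -> bool:
--     """Single left-to-right scan: at each position check whether any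
--     pattern starts there (one pass over positions instead of one full
--     substring search per pattern)."""
--     low = payload.lower()
--     return any(
--         any(low.startswith(p, i) for p in _PATTERNS)
--         for i in range(len(low))
--     )
-- ===== Notes on version B (the rewrite author's own statement) =====
-- stated objective: alternative
-- what changed: Replaces the per-pattern substring search loop (one full 'in' scan of the payload per pattern) by a single left-to-right scan over positions that tests at each position whether any pattern starts there; the empty-payload guard disappears since the scan of an empty string is vacuously False.
import Mathlib
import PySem

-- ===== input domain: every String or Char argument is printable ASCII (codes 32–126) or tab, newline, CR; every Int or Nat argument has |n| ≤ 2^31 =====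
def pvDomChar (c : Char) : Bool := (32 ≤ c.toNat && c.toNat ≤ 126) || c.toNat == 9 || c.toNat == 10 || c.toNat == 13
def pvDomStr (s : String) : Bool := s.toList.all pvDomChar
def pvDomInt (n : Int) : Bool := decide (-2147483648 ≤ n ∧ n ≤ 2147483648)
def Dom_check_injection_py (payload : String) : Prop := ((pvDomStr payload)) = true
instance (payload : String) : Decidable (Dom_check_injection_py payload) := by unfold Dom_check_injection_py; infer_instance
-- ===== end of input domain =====

-- B replaces the per-pattern substring-search loop by a single left-to-right scan over
-- positions testing whether any pattern starts there (alternative decomposition, same cost).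


-- ===== PORT A =====
def check_injection_py (payload : String) : Bool :=
  if payload == "" then false
  else
    let payload_lower := PySem.Str.lower payload
    let sql_patterns : List String :=
      ["' or '1'='1", "'; drop table", "union select", "' or 1=1", "1; delete from"]
    let xss_patterns : List String :=
      ["<script>", "javascript:", "onerror=", "onload="]
    let path_patterns : List String :=
      ["../", "..\\", "/etc/passwd"]
    let all_patterns := sql_patterns ++ xss_patterns ++ path_patterns
    all_patterns.any (fun p => PySem.Str.isIn p payload_lower)

-- ===== PORT B =====
-- the module-level _PATTERNS tuple of Source B
def pvPatterns : List String :=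
  ["' or '1'='1", "'; drop table", "union select", "' or 1=1", "1; delete from",
   "<script>", "javascript:", "onerror=", "onload=",
   "../", "..\\", "/etc/passwd"]

-- the scan over positions i = 0..len-1: low.startswith(p, i) is p.toList.isPrefixOf (low.drop i);
-- iterating i is realised as structural recursion over the suffixes of the lowered payload
def pvScan : List Char → Bool
  | [] => false
  | c :: rest => pvPatterns.any (fun p => p.toList.isPrefixOf (c :: rest)) || pvScan rest

def check_injection_py_alt (payload : String) : Bool :=
  pvScan (PySem.Str.lower payload).toList

-- ===== PRECONDITION & SPEC =====
def Spec_check_injection_py (payload : String) (out : Bool) : Prop := out = check_injection_py_alt payload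
instance (payload : String) (out : Bool) : Decidable (Spec_check_injection_py payload out) := by unfold Spec_check_injection_py; infer_instance

-- ===== CLAIM (what is proved, stated in full; the proofs are below) =====
def Claim_equal_check_injection_py : Prop := ∀ (payload : String), Dom_check_injection_py payload → Spec_check_injection_py payload (check_injection_py payload)

-- ===== LEMMAS AND PROOFS =====

theorem pvPatterns_ne_empty : ∀ p ∈ pvPatterns, p ≠ "" := by
  simp [pvPatterns]

theorem pvScan_iff (l : List Char) :
    pvScan l = true ↔ ∃ p ∈ pvPatterns, p.toList <:+: l := by
  induction l with
  | nil =>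
      simp only [pvScan]
      constructor
      · intro h; exact absurd h (by simp)
      · rintro ⟨p, hp, hinf⟩
        exact absurd (String.toList_eq_nil_iff.mp (List.eq_nil_of_infix_nil hinf))
          (pvPatterns_ne_empty p hp)
  | cons c rest ih =>
      simp only [pvScan, Bool.or_eq_true, List.any_eq_true, ih]
      constructor
      · rintro (⟨p, hp, hpre⟩ | ⟨p, hp, hinf⟩)
        · exact ⟨p, hp, (List.isPrefixOf_iff_prefix.mp hpre).isInfix⟩
        · exact ⟨p, hp, hinf.trans (List.suffix_cons c rest).isInfix⟩
      · rintro ⟨p, hp, hinf⟩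
        rcases List.infix_cons_iff.mp hinf with h | h
        · exact Or.inl ⟨p, hp, List.isPrefixOf_iff_prefix.mpr h⟩
        · exact Or.inr ⟨p, hp, h⟩

theorem check_injection_agree (payload : String) :
    check_injection_py payload = check_injection_py_alt payload := by
  unfold check_injection_py check_injection_py_alt
  by_cases h : payload = ""
  · subst h
    have h0 : (PySem.Str.lower "").toList = [] := by
      simp [PySem.Str.toList_lower, PySem.Chars.lower,
        String.toList_eq_nil_iff.mpr rfl]
    simp [h0, pvScan]
  · have hb : (payload == "") = false := by
      simpa using h
    simp only [hb, Bool.false_eq_true, if_false]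
    have hlist : (["' or '1'='1", "'; drop table", "union select", "' or 1=1",
        "1; delete from"] : List String) ++ ["<script>", "javascript:", "onerror=", "onload="]
        ++ ["../", "..\\", "/etc/passwd"] = pvPatterns := rfl
    rw [hlist, Bool.eq_iff_iff, List.any_eq_true, pvScan_iff]
    exact exists_congr fun p => and_congr_right fun _ =>
      PySem.Str.isIn_iff_infix p (PySem.Str.lower payload)

-- ===== VERDICT (by name: the statement is the Claim_ definition above) =====
theorem check_injection_py_spec : Claim_equal_check_injection_py := by
  intro payload _
  exact check_injection_agree payload
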